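-- pv_equiv track=rewrite | github.com/ulab-uiuc/Time-R1 | verl/utils/reward_score/time_reasoning_fixed_alpha.py | is_valid_month
-- ===== SOURCE A (Python) =====
-- months_and_variants = {
--             "January": ["january", "jan", "jan."],
--             "February": ["february", "feb", "feb."],
--             "March": ["march", "mar", "mar."],
--             "April": ["april", "apr", "apr."],
--             "May": ["may"],
--             "June": ["june", "jun", "jun."],
--             "July": ["july", "jul", "jul."],
--             "August": ["august", "aug", "aug."],
--             "September": ["september", "sept", "sept.", "sep", "sep."],
--             "October": ["october", "oct", "oct."],
--             "November": ["november", "nov", "nov."],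
--             "December": ["december", "dec", "dec."]
--         }
--
-- def is_valid_month(month_str):
--     """Verify that the input is a valid month name or variant"""
--     month_str_lower = month_str.lower()
--
--     # Check if any month or its variants are matched
--     for standard_month, variants in months_and_variants.items():
--         if month_str_lower in variants or month_str_lower == standard_month.lower():
--             return True
--
--     # If it is a number, check whether it is within the range of 1-12
--     try:
--         month_num = int(month_str)
--         return 1 <= month_num <= 12
--     except ValueError:
--         pass
--
--     return False
-- ===== SOURCE B (Python) =====
-- # Alternative: a precomputed trie/DFA over characters replaces A's scan of the month table;
-- # the int() fallback with the 1-12 range check is unchanged.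
-- _WORDS = ["january", "jan", "jan.",
--           "february", "feb", "feb.",
--           "march", "mar", "mar.",
--           "april", "apr", "apr.",
--           "may",
--           "june", "jun", "jun.",
--           "july", "jul", "jul.",
--           "august", "aug", "aug.",
--           "september", "sept", "sept.", "sep", "sep.",
--           "october", "oct", "oct.",
--           "november", "nov", "nov.",
--           "december", "dec", "dec."]
--
-- # Build the trie once: states are ints, 0 is the root.
-- _TRANS = {}      # (state, char) -> state
-- _ACCEPT = set()  # accepting states
-- _N = 1
-- for _w in _WORDS:
--     _s = 0
--     for _c in _w:
--         _t = _TRANS.get((_s, _c))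
--         if _t is None:
--             _t = _N
--             _N += 1
--             _TRANS[(_s, _c)] = _t
--         _s = _t
--     _ACCEPT.add(_s)
--
-- def is_valid_month(month_str):
--     """Verify that the input is a valid month name or variant"""
--     state = 0
--     for ch in month_str.lower():
--         state = _TRANS.get((state, ch))
--         if state is None:
--             break
--     else:
--         if state in _ACCEPT:
--             return True
--     try:
--         return 1 <= int(month_str) <= 12
--     except ValueError:
--         return False
-- ===== Notes on version B (the rewrite author's own statement) =====
-- stated objective: alternative
-- what changed: B recognises month names with a precomputed character trie/DFA (built once from the flat word list, then walked one character at a time over the lowered input) instead of A's loop over the month dict testing list membership and lowered-key equality per entry; the int() fallback with the 1-12 range check is unchanged.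
import Mathlib
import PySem

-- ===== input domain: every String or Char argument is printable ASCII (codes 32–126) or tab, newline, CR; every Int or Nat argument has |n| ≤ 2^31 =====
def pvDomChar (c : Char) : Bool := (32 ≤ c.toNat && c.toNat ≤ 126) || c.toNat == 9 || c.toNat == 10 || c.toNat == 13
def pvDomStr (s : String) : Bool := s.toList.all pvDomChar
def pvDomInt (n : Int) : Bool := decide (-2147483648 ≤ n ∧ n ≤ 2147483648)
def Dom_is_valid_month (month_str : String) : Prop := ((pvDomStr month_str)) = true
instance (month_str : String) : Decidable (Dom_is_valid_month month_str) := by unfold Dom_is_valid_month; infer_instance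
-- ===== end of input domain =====

-- B recognises month names with a precomputed character trie (a DFA walked one character
-- at a time) instead of A's scan over the month table; the int() fallback is unchanged.
-- (objective: alternative)

-- ===== PORT A =====
-- module-level dict months_and_variants
def months_and_variants : List (String × List String) :=  -- dict literal ported as its association list (distinct keys)
  [("January", ["january", "jan", "jan."]),
   ("February", ["february", "feb", "feb."]),
   ("March", ["march", "mar", "mar."]),
   ("April", ["april", "apr", "apr."]),
   ("May", ["may"]),
   ("June", ["june", "jun", "jun."]),
   ("July", ["july", "jul", "jul."]),
   ("August", ["august", "aug", "aug."]),
   ("September", ["september", "sept", "sept.", "sep", "sep."]),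
   ("October", ["october", "oct", "oct."]),
   ("November", ["november", "nov", "nov."]),
   ("December", ["december", "dec", "dec."])]

-- the 'for ... return True' loop over the dict's items, with early return
def monthLoop (ml : String) : List (String × List String) → Bool
  | [] => false
  | (standard_month, variants) :: rest =>
      if variants.contains ml || ml == PySem.Str.lower standard_month then true
      else monthLoop ml rest

def is_valid_month (month_str : String) : Bool :=
  let month_str_lower := PySem.Str.lower month_str
  if monthLoop month_str_lower months_and_variants then true
  else
    match PySem.Int.ofStr? month_str with
    | some month_num => decide (1 ≤ month_num ∧ month_num ≤ 12)
    | none => false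

-- ===== PORT B =====
-- module-level list _WORDS
def trieWords : List String :=
  ["january", "jan", "jan.",
   "february", "feb", "feb.",
   "march", "mar", "mar.",
   "april", "apr", "apr.",
   "may",
   "june", "jun", "jun.",
   "july", "jul", "jul.",
   "august", "aug", "aug.",
   "september", "sept", "sept.", "sep", "sep.",
   "october", "oct", "oct.",
   "november", "nov", "nov.",
   "december", "dec", "dec."]

-- the inner 'for _c in _w' loop of the module-level trie construction
-- (state: (_TRANS, _N, _s)); returns the updated (_TRANS, _N) and the final state _s
def insertChars (trans : PySem.Dict (Nat × Char) Nat) (n s : Nat) :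
    List Char → PySem.Dict (Nat × Char) Nat × Nat × Nat
  | [] => (trans, n, s)
  | c :: cs =>
      match PySem.Dict.get? trans (s, c) with
      | some t => insertChars trans n t cs
      | none => insertChars (PySem.Dict.insert trans (s, c) n) (n + 1) n cs

-- the module-level 'for _w in _WORDS' loop building (_TRANS, _ACCEPT, _N)
def buildTrie : PySem.Dict (Nat × Char) Nat × PySem.Set Nat × Nat :=
  trieWords.foldl
    (fun acc w =>
      let r := insertChars acc.1 acc.2.2 0 w.toList
      (r.1, PySem.Set.add acc.2.1 r.2.2, r.2.1))
    (PySem.Dict.empty, PySem.Set.empty, 1)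

-- the 'for ch in month_str.lower()' walk; none = the loop broke on a missing transition
def walkLoop (trans : PySem.Dict (Nat × Char) Nat) : Nat → List Char → Option Nat
  | st, [] => some st
  | st, c :: cs =>
      match PySem.Dict.get? trans (st, c) with
      | some t => walkLoop trans t cs
      | none => none

-- the try/except int fallback
def numFallback (month_str : String) : Bool :=
  match PySem.Int.ofStr? month_str with
  | some month_num => decide (1 ≤ month_num ∧ month_num ≤ 12)
  | none => false

def is_valid_month_alt (month_str : String) : Bool :=
  match walkLoop buildTrie.1 0 (PySem.Str.lower month_str).toList with
  | some st => if PySem.Set.contains buildTrie.2.1 st then true else numFallback month_str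
  | none => numFallback month_str

-- ===== PRECONDITION & SPEC =====
def Spec_is_valid_month (month_str : String) (out : Bool) : Prop := out = is_valid_month_alt month_str
instance (month_str : String) (out : Bool) : Decidable (Spec_is_valid_month month_str out) := by unfold Spec_is_valid_month; infer_instance

-- ===== CLAIM (what is proved, stated in full; the proofs are below) =====
def Claim_equal_is_valid_month : Prop := ∀ (month_str : String), Dom_is_valid_month month_str → Spec_is_valid_month month_str (is_valid_month month_str)

-- ===== LEMMAS AND PROOFS =====

-- proof-side literal copies of the built trie (checked equal to buildTrie below)
def transL : PySem.Dict (Nat × Char) Nat :=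
  PySem.Dict.mk
    [((0, 'j'), 1), ((1, 'a'), 2), ((2, 'n'), 3), ((3, 'u'), 4), ((4, 'a'), 5), ((5, 'r'), 6), ((6, 'y'), 7), ((3, '.'), 8), ((0, 'f'), 9), ((9, 'e'), 10), ((10, 'b'), 11), ((11, 'r'), 12), ((12, 'u'), 13), ((13, 'a'), 14), ((14, 'r'), 15), ((15, 'y'), 16), ((11, '.'), 17), ((0, 'm'), 18), ((18, 'a'), 19), ((19, 'r'), 20), ((20, 'c'), 21), ((21, 'h'), 22), ((20, '.'), 23), ((0, 'a'), 24), ((24, 'p'), 25), ((25, 'r'), 26), ((26, 'i'), 27), ((27, 'l'), 28), ((26, '.'), 29), ((19, 'y'), 30), ((1, 'u'), 31), ((31, 'n'), 32), ((32, 'e'), 33), ((32, '.'), 34), ((31, 'l'), 35), ((35, 'y'), 36), ((35, '.'), 37), ((24, 'u'), 38), ((38, 'g'), 39), ((39, 'u'), 40), ((40, 's'), 41), ((41, 't'), 42), ((39, '.'), 43), ((0, 's'), 44), ((44, 'e'), 45), ((45, 'p'), 46), ((46, 't'), 47), ((47, 'e'), 48), ((48, 'm'), 49), ((49, 'b'),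 50), ((50, 'e'), 51), ((51, 'r'), 52), ((47, '.'), 53), ((46, '.'), 54), ((0, 'o'), 55), ((55, 'c'), 56), ((56, 't'), 57), ((57, 'o'), 58), ((58, 'b'), 59), ((59, 'e'), 60), ((60, 'r'), 61), ((57, '.'), 62), ((0, 'n'), 63), ((63, 'o'), 64), ((64, 'v'), 65), ((65, 'e'), 66), ((66, 'm'), 67), ((67, 'b'), 68), ((68, 'e'), 69), ((69, 'r'), 70), ((65, '.'), 71), ((0, 'd'), 72), ((72, 'e'), 73), ((73, 'c'), 74), ((74, 'e'), 75), ((75, 'm'), 76), ((76, 'b'), 77), ((77, 'e'), 78), ((78, 'r'), 79), ((74, '.'), 80)]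

def acceptL : PySem.Set Nat := [7, 3, 8, 16, 11, 17, 22, 20, 23, 28, 26, 29, 30, 33, 32, 34, 36, 35, 37, 42, 39, 43, 52, 47, 53, 46, 54, 61, 57, 62, 70, 65, 71, 79, 74, 80]

-- for each trie state, the suffixes of trie words whose walk from the root stops there
def langTable : List (Nat × List String) :=
  [(0, ["january", "jan", "jan.", "february", "feb", "feb.", "march", "mar", "mar.", "april", "apr", "apr.", "may", "june", "jun", "jun.", "july", "jul", "jul.", "august", "aug", "aug.", "september", "sept", "sept.", "sep", "sep.", "october", "oct", "oct.", "november", "nov", "nov.", "december", "dec", "dec."]),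
   (1, ["anuary", "an", "an.", "une", "un", "un.", "uly", "ul", "ul."]),
   (2, ["nuary", "n", "n."]),
   (3, ["uary", "", "."]),
   (4, ["ary"]),
   (5, ["ry"]),
   (6, ["y"]),
   (7, [""]),
   (8, [""]),
   (9, ["ebruary", "eb", "eb."]),
   (10, ["bruary", "b", "b."]),
   (11, ["ruary", "", "."]),
   (12, ["uary"]),
   (13, ["ary"]),
   (14, ["ry"]),
   (15, ["y"]),
   (16, [""]),
   (17, [""]),
   (18, ["arch", "ar", "ar.", "ay"]),
   (19, ["rch", "r", "r.", "y"]),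
   (20, ["ch", "", "."]),
   (21, ["h"]),
   (22, [""]),
   (23, [""]),
   (24, ["pril", "pr", "pr.", "ugust", "ug", "ug."]),
   (25, ["ril", "r", "r."]),
   (26, ["il", "", "."]),
   (27, ["l"]),
   (28, [""]),
   (29, [""]),
   (30, [""]),
   (31, ["ne", "n", "n.", "ly", "l", "l."]),
   (32, ["e", "", "."]),
   (33, [""]),
   (34, [""]),
   (35, ["y", "", "."]),
   (36, [""]),
   (37, [""]),
   (38, ["gust", "g", "g."]),
   (39, ["ust", "", "."]),
   (40, ["st"]),
   (41, ["t"]),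
   (42, [""]),
   (43, [""]),
   (44, ["eptember", "ept", "ept.", "ep", "ep."]),
   (45, ["ptember", "pt", "pt.", "p", "p."]),
   (46, ["tember", "t", "t.", "", "."]),
   (47, ["ember", "", "."]),
   (48, ["mber"]),
   (49, ["ber"]),
   (50, ["er"]),
   (51, ["r"]),
   (52, [""]),
   (53, [""]),
   (54, [""]),
   (55, ["ctober", "ct", "ct."]),
   (56, ["tober", "t", "t."]),
   (57, ["ober", "", "."]),
   (58, ["ber"]),
   (59, ["er"]),
   (60, ["r"]),
   (61, [""]),
   (62, [""]),
   (63, ["ovember", "ov", "ov."]),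
   (64, ["vember", "v", "v."]),
   (65, ["ember", "", "."]),
   (66, ["mber"]),
   (67, ["ber"]),
   (68, ["er"]),
   (69, ["r"]),
   (70, [""]),
   (71, [""]),
   (72, ["ecember", "ec", "ec."]),
   (73, ["cember", "c", "c."]),
   (74, ["ember", "", "."]),
   (75, ["mber"]),
   (76, ["ber"]),
   (77, ["er"]),
   (78, ["r"]),
   (79, [""]),
   (80, [""])]

def Lang (st : Nat) : List (List Char) :=
  ((langTable.lookup st).getD []).map String.toList

set_option maxRecDepth 4000 in
theorem buildTrie_eq : buildTrie = (transL, acceptL, 81) := by decide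

-- the three finite facts the induction consumes, checked by computation
theorem accept_iff_nil : ∀ st ∈ List.range 81,
    PySem.Set.contains acceptL st = (Lang st).contains ([] : List Char) := by decide

theorem lang_step : ∀ st ∈ List.range 81, ∀ suf ∈ Lang st,
    (match suf with
     | [] => true
     | c :: t =>
        match PySem.Dict.get? transL (st, c) with
        | some s' => (Lang s').contains t
        | none => false) = true := by decide

theorem trans_closed : ∀ p ∈ transL.items,
    p.2 ∈ List.range 81 ∧ ∀ t ∈ Lang p.2, (p.1.2 :: t) ∈ Lang p.1.1 := by decide

-- the DFA walk from any reachable state decides membership in that state's language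
theorem walk_lang (cs : List Char) : ∀ st ∈ List.range 81,
    (match walkLoop transL st cs with
     | some t => PySem.Set.contains acceptL t
     | none => false) = (Lang st).contains cs := by
  induction cs with
  | nil =>
      intro st hst
      simpa [walkLoop] using accept_iff_nil st hst
  | cons c cs ih =>
      intro st hst
      rw [Bool.eq_iff_iff]
      simp only [walkLoop]
      cases h : PySem.Dict.get? transL (st, c) with
      | none =>
          simp only [List.contains_iff_mem]
          constructor
          · intro hfalse; cases hfalse
          · intro hmem
            have hs : (match PySem.Dict.get? transL (st, c) with
                | some s' => (Lang s').contains cs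
                | none => false) = true := lang_step st hst (c :: cs) hmem
            rw [h] at hs
            cases hs
      | some s' =>
          have hitems := PySem.Dict.mem_items_of_get?_eq_some transL h
          obtain ⟨hs'range, hclose⟩ := trans_closed ((st, c), s') hitems
          rw [ih s' hs'range]
          simp only [List.contains_iff_mem]
          constructor
          · intro hmem
            exact hclose cs hmem
          · intro hmem
            have hs : (match PySem.Dict.get? transL (st, c) with
                | some s' => (Lang s').contains cs
                | none => false) = true := lang_step st hst (c :: cs) hmem
            rw [h] at hs
            simpa [List.contains_iff_mem] using hs

-- A's early-return loop is membership in the flattened table (variants then lowered key, per entry)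
theorem monthLoop_any (ml : String) (items : List (String × List String)) :
    monthLoop ml items
      = (items.flatMap (fun p => p.2 ++ [PySem.Str.lower p.1])).contains ml := by
  induction items with
  | nil => rfl
  | cons p rest ih =>
      simp only [monthLoop, List.flatMap_cons]
      by_cases h : (p.2.contains ml || ml == PySem.Str.lower p.1) = true
      · rw [if_pos h]
        simp only [Bool.or_eq_true, List.contains_iff_mem, beq_iff_eq] at h
        symm
        simp only [List.contains_iff_mem, List.append_assoc, List.mem_append, List.mem_cons]
        tauto
      · rw [if_neg h, ih]
        simp only [Bool.or_eq_true, List.contains_iff_mem, beq_iff_eq, not_or] at h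
        rw [Bool.eq_iff_iff]
        simp only [List.contains_iff_mem, List.append_assoc, List.mem_append, List.mem_cons]
        tauto

-- membership in a list of strings is membership of the char lists
theorem contains_toList (L : List String) (s : String) :
    L.contains s = (L.map String.toList).contains s.toList := by
  induction L with
  | nil => rfl
  | cons w ws ih =>
      simp only [List.contains_cons, List.map_cons, ih]
      congr 1
      rw [Bool.eq_iff_iff, beq_iff_eq, beq_iff_eq, String.toList_inj]

-- the flattened month table and the trie words have the same members (duplicates aside)
theorem flat_table_lang0 (ml : String) :
    (months_and_variants.flatMap (fun p => p.2 ++ [PySem.Str.lower p.1])).contains ml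
      = (Lang 0).contains ml.toList := by
  rw [contains_toList]
  rw [Bool.eq_iff_iff]
  simp only [List.contains_iff_mem]
  constructor <;> intro hm
  · have hall : ∀ x ∈ (months_and_variants.flatMap
        (fun p => p.2 ++ [PySem.Str.lower p.1])).map String.toList, x ∈ Lang 0 := by decide
    exact hall _ hm
  · have hall : ∀ x ∈ Lang 0, x ∈ (months_and_variants.flatMap
        (fun p => p.2 ++ [PySem.Str.lower p.1])).map String.toList := by decide
    exact hall _ hm

-- ===== VERDICT (by name: the statement is the Claim_ definition above) =====
theorem is_valid_month_spec : Claim_equal_is_valid_month := by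
  intro s _
  unfold Spec_is_valid_month is_valid_month is_valid_month_alt
  rw [buildTrie_eq]
  have hw := walk_lang (PySem.Str.lower s).toList 0 (by decide)
  show (if monthLoop (PySem.Str.lower s) months_and_variants then true
        else match PySem.Int.ofStr? s with
             | some month_num => decide (1 ≤ month_num ∧ month_num ≤ 12)
             | none => false)
      = match walkLoop transL 0 (PySem.Str.lower s).toList with
        | some st => if PySem.Set.contains acceptL st then true else numFallback s
        | none => numFallback s
  rw [monthLoop_any, flat_table_lang0, ← hw]
  cases hwalk : walkLoop transL 0 (PySem.Str.lower s).toList with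
  | none => simp [numFallback]
  | some st => simp [numFallback]
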